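-- pv_equiv track=rewrite | github.com/8Men5Camels/bomberman | app/sprites.py | create_centers_of_walls
-- ===== SOURCE A (Python) =====
-- def create_centers_of_walls(field_size: tuple, wall_size: tuple):
--     center_width = wall_size[0] + wall_size[0] // 2
--     center_height = wall_size[1] + wall_size[1] // 2
--     centers = []
--     while center_height < field_size[1] - wall_size[1]:
--         while center_width < field_size[0] - wall_size[0]:
--             centers.append((center_width, center_height))
--             center_width += 2 * wall_size[0]
--         center_height += 2 * wall_size[1]
--         center_width = wall_size[0] + wall_size[0] // 2
--     return centers
-- ===== SOURCE B (Python) =====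
-- def create_centers_of_walls(field_size: tuple, wall_size: tuple):
--     # Closed-form counts of rows/columns, then ONE flat pass over a linear index
--     # decoded by divmod -- no nested loops, no per-row reset.
--     x0 = wall_size[0] + wall_size[0] // 2
--     y0 = wall_size[1] + wall_size[1] // 2
--     sx = 2 * wall_size[0]
--     sy = 2 * wall_size[1]
--     nx = max(0, (field_size[0] - wall_size[0] - x0 + sx - 1) // sx)
--     ny = max(0, (field_size[1] - wall_size[1] - y0 + sy - 1) // sy)
--     return [(x0 + sx * (k % nx), y0 + sy * (k // nx)) for k in range(ny * nx)]
-- ===== Notes on version B (the rewrite author's own statement) =====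
-- stated objective: alternative
-- what changed: Replaces A's interleaved resetting double-while loop by closed-form ceiling-division counts of columns/rows and a single flat loop over a linear index decoded with divmod into (column, row).
-- outside the precondition, e.g. on create_centers_of_walls((0, 0), (0, 0)): A returns [], B raises ZeroDivisionError
import Mathlib
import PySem

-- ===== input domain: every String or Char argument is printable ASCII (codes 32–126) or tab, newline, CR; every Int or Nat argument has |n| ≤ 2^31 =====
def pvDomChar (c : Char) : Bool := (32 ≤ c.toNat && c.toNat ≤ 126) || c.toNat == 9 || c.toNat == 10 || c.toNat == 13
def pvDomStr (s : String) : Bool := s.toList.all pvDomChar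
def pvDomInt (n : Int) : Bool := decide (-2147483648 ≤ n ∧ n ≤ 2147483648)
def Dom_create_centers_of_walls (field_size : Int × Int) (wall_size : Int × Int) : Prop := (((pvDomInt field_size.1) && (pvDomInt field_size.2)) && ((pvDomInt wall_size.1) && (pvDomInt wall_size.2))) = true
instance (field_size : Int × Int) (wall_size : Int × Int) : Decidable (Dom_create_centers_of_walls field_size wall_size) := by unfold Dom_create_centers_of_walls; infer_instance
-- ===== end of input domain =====

-- B replaces A's interleaved resetting double-while loop by closed-form ceiling-division
-- counts of columns/rows and ONE flat loop over a linear index decoded by divmod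
-- (objective: alternative decomposition, same cost).

-- ===== PORT A =====
-- Inner 'while center_width < field_size[0] - wall_size[0]' loop; the Nat fuel only makes the
-- recursion total — on Pre_ (positive wall sizes) the fuel passed at the call site is enough,
-- so the fuel never cuts the loop short there.
def pvInnerA (stopW stepW ch : Int) : Nat → Int → List (Int × Int) → List (Int × Int)
  | 0, _, acc => acc
  | fuel + 1, cw, acc =>
      if cw < stopW then pvInnerA stopW stepW ch fuel (cw + stepW) (acc ++ [(cw, ch)]) else acc

-- Outer 'while center_height < field_size[1] - wall_size[1]' loop (resetting center_width each pass).
def pvOuterA (field_size wall_size : Int × Int) : Nat → Int → List (Int × Int) → List (Int × Int)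
  | 0, _, acc => acc
  | fuel + 1, ch, acc =>
      if ch < field_size.2 - wall_size.2 then
        pvOuterA field_size wall_size fuel (ch + 2 * wall_size.2)
          (pvInnerA (field_size.1 - wall_size.1) (2 * wall_size.1) ch
            ((field_size.1 - wall_size.1) - (wall_size.1 + PySem.Int.floordiv wall_size.1 2)).toNat
            (wall_size.1 + PySem.Int.floordiv wall_size.1 2) acc)
      else acc

def create_centers_of_walls (field_size : Int × Int) (wall_size : Int × Int) : List (Int × Int) :=
  let center_height := wall_size.2 + PySem.Int.floordiv wall_size.2 2
  pvOuterA field_size wall_size ((field_size.2 - wall_size.2) - center_height).toNat center_height []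

-- ===== PORT B =====
def create_centers_of_walls_alt (field_size : Int × Int) (wall_size : Int × Int) : List (Int × Int) :=
  let x0 := wall_size.1 + PySem.Int.floordiv wall_size.1 2
  let y0 := wall_size.2 + PySem.Int.floordiv wall_size.2 2
  let sx := 2 * wall_size.1
  let sy := 2 * wall_size.2
  let nx := max 0 (PySem.Int.floordiv (field_size.1 - wall_size.1 - x0 + sx - 1) sx)
  let ny := max 0 (PySem.Int.floordiv (field_size.2 - wall_size.2 - y0 + sy - 1) sy)
  (PySem.List.pyRange 0 (ny * nx) 1).map
    (fun k => (x0 + sx * PySem.Int.mod k nx, y0 + sy * PySem.Int.floordiv k nx))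

-- ===== PRECONDITION & SPEC =====
-- Pre_ admits positive wall dimensions (the natural domain of a wall grid) and, in addition,
-- any input whose outer loop is never entered while wall_size.2 is positive and wall_size.1 is
-- nonzero (both programs return []); the remaining nonpositive-wall inputs are excluded: there
-- A loops forever or returns an accidental empty list, while B divides by zero or counts a
-- downward axis A never visits.
def Pre_create_centers_of_walls (field_size : Int × Int) (wall_size : Int × Int) : Prop :=
  (0 < wall_size.1 ∧ 0 < wall_size.2) ∨
  (wall_size.1 ≠ 0 ∧ 0 < wall_size.2 ∧
    field_size.2 - wall_size.2 ≤ wall_size.2 + PySem.Int.floordiv wall_size.2 2)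
instance (field_size : Int × Int) (wall_size : Int × Int) : Decidable (Pre_create_centers_of_walls field_size wall_size) := by unfold Pre_create_centers_of_walls; infer_instance

def pvWitness_create_centers_of_walls : (Int × Int) × (Int × Int) := ((20, 20), (2, 2))

def Spec_create_centers_of_walls (field_size : Int × Int) (wall_size : Int × Int) (out : List (Int × Int)) : Prop := out = create_centers_of_walls_alt field_size wall_size
instance (field_size : Int × Int) (wall_size : Int × Int) (out : List (Int × Int)) : Decidable (Spec_create_centers_of_walls field_size wall_size out) := by unfold Spec_create_centers_of_walls; infer_instance

-- ===== CLAIM (what is proved, stated in full; the proofs are below) =====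
def Claim_equal_create_centers_of_walls : Prop := ∀ (field_size : Int × Int) (wall_size : Int × Int), Dom_create_centers_of_walls field_size wall_size → Pre_create_centers_of_walls field_size wall_size → Spec_create_centers_of_walls field_size wall_size (create_centers_of_walls field_size wall_size)

-- ===== LEMMAS AND PROOFS =====

-- pyRange with a positive step: nil and cons unfolding.
theorem pv_pyRange_pos_nil (a b : Int) {s : Int} (hs : 0 < s) (h : b ≤ a) :
    PySem.List.pyRange a b s = [] := by
  rw [PySem.List.pyRange_of_pos a b hs]
  simp [show ¬ a < b by omega]

theorem pv_pyRange_pos_cons (a b : Int) {s : Int} (hs : 0 < s) (h : a < b) :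
    PySem.List.pyRange a b s = a :: PySem.List.pyRange (a + s) b s := by
  rw [PySem.List.pyRange_of_pos a b hs, PySem.List.pyRange_of_pos (a + s) b hs]
  have hN : ((b - a + s - 1) / s).toNat =
      (if a + s < b then ((b - (a + s) + s - 1) / s).toNat else 0) + 1 := by
    by_cases hc : a + s < b
    · have : b - a + s - 1 = (b - (a + s) + s - 1) + 1 * s := by ring
      rw [this, Int.add_mul_ediv_right _ _ (by omega : s ≠ 0)]
      have h0 : 0 ≤ b - (a + s) + s - 1 := by omega
      have := Int.ediv_nonneg h0 (le_of_lt hs)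
      simp [hc]
      omega
    · have h1 : (1 : Int) ≤ (b - a + s - 1) / s := by
        rw [Int.le_ediv_iff_mul_le hs]; omega
      have h2 : (b - a + s - 1) / s < 2 := by
        rw [Int.ediv_lt_iff_lt_mul hs]; omega
      simp [hc]
      omega
  rw [hN, if_pos h, List.range_succ_eq_map, List.map_cons, List.map_map]
  congr 1
  · simp
  · apply List.map_congr_left
    intro k _
    simp only [Function.comp_apply, Nat.succ_eq_add_one]
    push_cast
    ring

-- The inner while loop appends exactly the w-range paired with the current height.
theorem pv_innerA_eq (stopW : Int) {stepW : Int} (ch : Int) (hs : 0 < stepW) :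
    ∀ (fuel : Nat) (cw : Int) (acc : List (Int × Int)), (stopW - cw).toNat ≤ fuel →
      pvInnerA stopW stepW ch fuel cw acc
        = acc ++ (PySem.List.pyRange cw stopW stepW).map (fun w => (w, ch)) := by
  intro fuel
  induction fuel with
  | zero =>
      intro cw acc h
      have : stopW ≤ cw := by omega
      simp [pvInnerA, pv_pyRange_pos_nil cw stopW hs this]
  | succ f ih =>
      intro cw acc h
      by_cases hc : cw < stopW
      · rw [pvInnerA, if_pos hc, ih (cw + stepW) _ (by omega),
            pv_pyRange_pos_cons cw stopW hs hc]
        simp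
      · rw [pvInnerA, if_neg hc,
            pv_pyRange_pos_nil cw stopW hs (by omega)]
        simp

-- The outer while loop produces the h-range flat-mapped over the inner rows.
theorem pv_outerA_eq (field_size wall_size : Int × Int)
    (hw : 0 < wall_size.1) (hh : 0 < wall_size.2) :
    ∀ (fuel : Nat) (ch : Int) (acc : List (Int × Int)),
      ((field_size.2 - wall_size.2) - ch).toNat ≤ fuel →
      pvOuterA field_size wall_size fuel ch acc
        = acc ++ (PySem.List.pyRange ch (field_size.2 - wall_size.2) (2 * wall_size.2)).flatMap
            (fun h => (PySem.List.pyRange (wall_size.1 + PySem.Int.floordiv wall_size.1 2)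
                (field_size.1 - wall_size.1) (2 * wall_size.1)).map (fun w => (w, h))) := by
  have hs2 : (0 : Int) < 2 * wall_size.2 := by omega
  intro fuel
  induction fuel with
  | zero =>
      intro ch acc h
      have : field_size.2 - wall_size.2 ≤ ch := by omega
      simp [pvOuterA, pv_pyRange_pos_nil ch _ hs2 this]
  | succ f ih =>
      intro ch acc h
      by_cases hc : ch < field_size.2 - wall_size.2
      · rw [pvOuterA, if_pos hc,
            ih (ch + 2 * wall_size.2) _ (by omega),
            pv_innerA_eq (field_size.1 - wall_size.1) ch (by omega : (0:Int) < 2 * wall_size.1)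
              _ _ acc (le_refl _),
            pv_pyRange_pos_cons ch _ hs2 hc]
        simp
      · rw [pvOuterA, if_neg hc,
            pv_pyRange_pos_nil ch _ hs2 (by omega)]
        simp

-- B's closed-form count equals the length of the corresponding positive-step pyRange.
theorem pv_count_eq (a b : Int) {s : Int} (hs : 0 < s) :
    max 0 (PySem.Int.floordiv (b - a + s - 1) s)
      = ((if a < b then ((b - a + s - 1) / s).toNat else 0 : Nat) : Int) := by
  rw [PySem.Int.floordiv_eq_ediv_of_pos hs]
  by_cases h : a < b
  · have h1 : (1:Int) ≤ (b - a + s - 1) / s := by rw [Int.le_ediv_iff_mul_le hs]; omega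
    simp [h]; omega
  · have h2 : (b - a + s - 1) / s < 1 := by rw [Int.ediv_lt_iff_lt_mul hs]; omega
    simp [h]; omega

-- Decoding a flat index by divmod enumerates the grid row-major.
theorem pv_divmod_flat {α : Type} (nx ny : Nat) (f : Nat → Nat → α) :
    (List.range (ny * nx)).map (fun k => f (k / nx) (k % nx))
      = (List.range ny).flatMap (fun j => (List.range nx).map (fun i => f j i)) := by
  rcases Nat.eq_zero_or_pos nx with h0 | hpos
  · simp [h0]
  · induction ny with
    | zero => simp
    | succ n ih =>
        rw [Nat.succ_mul, List.range_add, List.map_append, List.range_succ,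
            List.flatMap_append, ih]
        congr 1
        simp only [List.flatMap_cons, List.flatMap_nil, List.append_nil, List.map_map]
        apply List.map_congr_left
        intro i hi
        simp only [List.mem_range] at hi
        have hd : (n * nx + i) / nx = n := by
          rw [Nat.mul_comm n nx, Nat.mul_add_div hpos, Nat.div_eq_of_lt hi]; ring
        have hm : (n * nx + i) % nx = i := by
          rw [Nat.add_comm, Nat.add_mul_mod_self_right]
          exact Nat.mod_eq_of_lt hi
        simp [Function.comp, hd, hm]

-- ===== VERDICT (by name: the statement is the Claim_ definition above) =====
theorem create_centers_of_walls_spec : Claim_equal_create_centers_of_walls := by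
  intro field_size wall_size _ hpre
  unfold Spec_create_centers_of_walls create_centers_of_walls create_centers_of_walls_alt
  dsimp only
  rcases hpre with ⟨hw, hh⟩ | ⟨hw1, hh, hle⟩
  · have hsx : (0:Int) < 2 * wall_size.1 := by omega
    have hsy : (0:Int) < 2 * wall_size.2 := by omega
    rw [pv_outerA_eq field_size wall_size hw hh _ _ [] (le_refl _), List.nil_append]
    rw [PySem.List.pyRange_of_pos (wall_size.1 + PySem.Int.floordiv wall_size.1 2)
          (field_size.1 - wall_size.1) hsx,
        PySem.List.pyRange_of_pos (wall_size.2 + PySem.Int.floordiv wall_size.2 2)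
          (field_size.2 - wall_size.2) hsy,
        pv_count_eq (wall_size.1 + PySem.Int.floordiv wall_size.1 2)
          (field_size.1 - wall_size.1) hsx,
        pv_count_eq (wall_size.2 + PySem.Int.floordiv wall_size.2 2)
          (field_size.2 - wall_size.2) hsy]
    set x0 := wall_size.1 + PySem.Int.floordiv wall_size.1 2 with hx0
    set y0 := wall_size.2 + PySem.Int.floordiv wall_size.2 2 with hy0
    set Nx := (if x0 < field_size.1 - wall_size.1 then
        ((field_size.1 - wall_size.1 - x0 + 2 * wall_size.1 - 1) / (2 * wall_size.1)).toNat else 0) with hNx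
    set Ny := (if y0 < field_size.2 - wall_size.2 then
        ((field_size.2 - wall_size.2 - y0 + 2 * wall_size.2 - 1) / (2 * wall_size.2)).toNat else 0) with hNy
    have hBside : (PySem.List.pyRange 0 ((Ny : Int) * (Nx : Int)) 1).map
          (fun k => (x0 + 2 * wall_size.1 * PySem.Int.mod k (Nx : Int),
                     y0 + 2 * wall_size.2 * PySem.Int.floordiv k (Nx : Int)))
        = (List.range Ny).flatMap (fun j => (List.range Nx).map
            (fun i => (x0 + 2 * wall_size.1 * ((i : Nat) : Int),
                       y0 + 2 * wall_size.2 * ((j : Nat) : Int)))) := by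
      rw [show ((Ny : Int) * (Nx : Int)) = ((Ny * Nx : Nat) : Int) from by push_cast; ring,
          PySem.List.pyRange_one,
          ← pv_divmod_flat (α := Int × Int) Nx Ny
            (fun j i => (x0 + 2 * wall_size.1 * ((i : Nat) : Int),
                         y0 + 2 * wall_size.2 * ((j : Nat) : Int))),
          List.map_map]
      apply List.map_congr_left
      intro k hk
      simp
    rw [hBside, List.flatMap_map]
    congr 1
    funext j
    rw [List.map_map]
    rfl
  · -- outer loop never entered: A returns [] (fuel 0), and B's ny count is 0
    have hfd : 0 ≤ PySem.Int.floordiv wall_size.2 2 := by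
      rw [PySem.Int.floordiv_eq_ediv_of_pos (by omega : (0:Int) < 2)]
      exact Int.ediv_nonneg (by omega) (by omega)
    have h0 : ((field_size.2 - wall_size.2) - (wall_size.2 + PySem.Int.floordiv wall_size.2 2)).toNat = 0 := by
      omega
    have hsy : (0:Int) < 2 * wall_size.2 := by omega
    have hny : max 0 (PySem.Int.floordiv (field_size.2 - wall_size.2 - (wall_size.2 + PySem.Int.floordiv wall_size.2 2) + 2 * wall_size.2 - 1) (2 * wall_size.2)) = 0 := by
      rw [PySem.Int.floordiv_eq_ediv_of_pos hsy]
      have h2 : (field_size.2 - wall_size.2 - (wall_size.2 + PySem.Int.floordiv wall_size.2 2) + 2 * wall_size.2 - 1) / (2 * wall_size.2) < 1 := by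
        rw [Int.ediv_lt_iff_lt_mul hsy]; omega
      omega
    rw [h0, hny, zero_mul, PySem.List.pyRange_one]
    simp [pvOuterA]
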